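-- pv_equiv track=rewrite | github.com/Infinime/bayes-nets | language_models.py | depunct
-- ===== SOURCE A (Python) =====
-- import string
--
-- def depunct(word):
--     arr = []
--     word = word.strip()
--     blep = ''
--     ori = len(word)
--     if punctin(word):
--         for index in range(ori):
--             if word[index] in string.punctuation + "\t\n\r\x0b\x0c":
--                 arr += [blep]
--                 blep = ''
--                 arr += [word[index]]
--             else:
--                 blep += word[index]
--         arr += [blep]
--     else:
--         arr.append(word)
--     return arr
--
-- def punctin(word):
--     for sym in string.punctuation + "\t\n\r\x0b\x0c":
--         if sym in word:
--             return True
--     return False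
-- ===== SOURCE B (Python) =====
-- import string
--
-- _DELIMS = set(string.punctuation + "\t\n\r\x0b\x0c")
--
-- def depunct(word):
--     def go(s):
--         i = 0
--         while i < len(s) and s[i] not in _DELIMS:
--             i += 1
--         if i == len(s):
--             return [s]
--         return [s[:i], s[i]] + go(s[i + 1:])
--     return go(word.strip())
-- ===== Notes on version B (the rewrite author's own statement) =====
-- stated objective: alternative
-- what changed: B drops A's punctin pre-scan and char-by-char accumulator loop; it recursively splits the stripped word at the first delimiter (slice prefix, delimiter, recurse on the rest), handling the delimiter-free case uniformly as the base case.
import Mathlib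
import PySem

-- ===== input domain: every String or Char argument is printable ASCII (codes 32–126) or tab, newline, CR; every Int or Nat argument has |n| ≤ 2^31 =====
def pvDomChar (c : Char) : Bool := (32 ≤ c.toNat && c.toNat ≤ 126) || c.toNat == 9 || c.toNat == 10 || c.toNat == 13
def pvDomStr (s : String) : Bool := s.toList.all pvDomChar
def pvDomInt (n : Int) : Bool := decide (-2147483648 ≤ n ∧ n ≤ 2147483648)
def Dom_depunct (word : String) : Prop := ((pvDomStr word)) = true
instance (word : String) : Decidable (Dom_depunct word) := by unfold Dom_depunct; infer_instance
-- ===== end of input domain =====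

-- B replaces A's punctin pre-scan + accumulator loop with recursive splitting at the
-- first delimiter (alternative decomposition; return values are identical).

-- string.punctuation + "\t\n\r\x0b\x0c"
def pvDelims : List Char := "!\"#$%&'()*+,-./:;<=>?@[\\]^_`{|}~\t\n\r\x0B\x0C".toList

-- ===== PORT A =====
def punctin (w : List Char) : Bool := pvDelims.any (fun sym => w.contains sym)

def depunct (word : String) : List String :=
  let w := (PySem.Str.strip word).toList
  if punctin w then
    let st := w.foldl
      (fun (st : List String × List Char) c =>
        if pvDelims.contains c then (st.1 ++ [String.mk st.2, String.mk [c]], [])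
        else (st.1, st.2 ++ [c]))
      ([], [])
    st.1 ++ [String.mk st.2]
  else [String.mk w]

-- ===== PORT B =====
def altGo (cs : List Char) : List String :=
  match h : cs.dropWhile (fun c => !pvDelims.contains c) with
  | [] => [String.mk (cs.takeWhile (fun c => !pvDelims.contains c))]
  | d :: tl =>
      String.mk (cs.takeWhile (fun c => !pvDelims.contains c)) :: String.mk [d] :: altGo tl
termination_by cs.length
decreasing_by
  have hle := List.length_dropWhile_le (fun c => !pvDelims.contains c) cs
  rw [h] at hle; simp at hle; omega

def depunct_alt (word : String) : List String :=
  altGo (PySem.Str.strip word).toList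

-- ===== PRECONDITION & SPEC =====
def Spec_depunct (word : String) (out : List String) : Prop := out = depunct_alt word
instance (word : String) (out : List String) : Decidable (Spec_depunct word out) := by unfold Spec_depunct; infer_instance

-- ===== CLAIM (what is proved, stated in full; the proofs are below) =====
def Claim_equal_depunct : Prop := ∀ (word : String), Dom_depunct word → Spec_depunct word (depunct word)

-- ===== LEMMAS AND PROOFS =====

-- recursive characterisation of A's fold
def gTok (acc : List Char) : List Char → List String
  | [] => [String.mk acc]
  | c :: tl =>
      if pvDelims.contains c then String.mk acc :: String.mk [c] :: gTok [] tl
      else gTok (acc ++ [c]) tl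

lemma foldA_eq_gTok : ∀ (cs : List Char) (arr : List String) (acc : List Char),
    (cs.foldl
      (fun (st : List String × List Char) c =>
        if pvDelims.contains c then (st.1 ++ [String.mk st.2, String.mk [c]], [])
        else (st.1, st.2 ++ [c])) (arr, acc)).1
      ++ [String.mk (cs.foldl
      (fun (st : List String × List Char) c =>
        if pvDelims.contains c then (st.1 ++ [String.mk st.2, String.mk [c]], [])
        else (st.1, st.2 ++ [c])) (arr, acc)).2]
      = arr ++ gTok acc cs := by
  intro cs
  induction cs with
  | nil => intro arr acc; simp [gTok]
  | cons c tl ih =>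
      intro arr acc
      by_cases hc : c ∈ pvDelims
      · simp only [List.contains_eq_mem, decide_eq_true_eq] at ih
        simp [List.foldl_cons, gTok, List.contains_eq_mem, hc, ih]
      · simp only [List.contains_eq_mem, decide_eq_true_eq] at ih
        simp [List.foldl_cons, gTok, List.contains_eq_mem, hc, ih]

lemma gTok_take : ∀ (cs acc : List Char),
    gTok acc cs =
      match cs.dropWhile (fun c => !pvDelims.contains c) with
      | [] => [String.mk (acc ++ cs)]
      | d :: tl =>
          String.mk (acc ++ cs.takeWhile (fun c => !pvDelims.contains c))
            :: String.mk [d] :: gTok [] tl := by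
  intro cs
  induction cs with
  | nil => intro acc; simp [gTok]
  | cons c tl ih =>
      intro acc
      by_cases hc : c ∈ pvDelims
      · simp [gTok, List.contains_eq_mem, hc, List.dropWhile_cons, List.takeWhile_cons]
      · simp only [gTok, List.contains_eq_mem, hc, decide_false, Bool.not_false, if_true,
          if_false, List.dropWhile_cons, List.takeWhile_cons]
        rw [ih (acc ++ [c])]
        simp only [List.contains_eq_mem]
        cases h : tl.dropWhile (fun c => !decide (c ∈ pvDelims)) with
        | nil => simp
        | cons d t2 => simp

lemma altGo_eq_gTok (cs : List Char) : altGo cs = gTok [] cs := by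
  induction hn : cs.length using Nat.strong_induction_on generalizing cs with
  | _ n ih =>
    rw [gTok_take, altGo]
    split
    · rename_i h
      rw [h]
      rw [List.takeWhile_eq_self_iff.mpr (List.dropWhile_eq_nil_iff.mp h)]
      simp
    · rename_i d tl h
      have hle := List.length_dropWhile_le (fun c => !pvDelims.contains c) cs
      rw [h] at hle; simp at hle
      rw [h]
      simp only [List.nil_append]
      rw [ih tl.length (by omega) tl rfl]

lemma no_delim_dropWhile (w : List Char) (h : punctin w = false) :
    w.dropWhile (fun c => !pvDelims.contains c) = [] := by
  rw [List.dropWhile_eq_nil_iff]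
  intro c hc
  simp only [punctin, List.any_eq_false, List.contains_eq_mem, decide_eq_false_iff_not] at h
  have hnd : c ∉ pvDelims := fun hm => by simpa [hc] using h c hm
  simpa using hnd

-- ===== VERDICT (by name: the statement is the Claim_ definition above) =====
theorem depunct_spec : Claim_equal_depunct := by
  intro word _
  unfold Spec_depunct depunct depunct_alt
  set w := (PySem.Str.strip word).toList with hw
  by_cases hp : punctin w
  · simp only [hp, if_true]
    rw [foldA_eq_gTok w [] [], altGo_eq_gTok]
    simp
  · simp only [hp, Bool.false_eq_true, if_false]
    rw [altGo_eq_gTok, gTok_take, no_delim_dropWhile w (by simpa using hp)]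
    simp
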